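-- pv_equiv track=rewrite | github.com/bluhmskidmore-tech/arvinfinanceanalyse | backend/app/services/macro_vendor_service.py | _aggregate_quality_flags
-- ===== SOURCE A (Python) =====
-- def _aggregate_quality_flags(values: list[str]) -> str:
--     normalized = {_normalize_quality_flag(value) for value in values if value}
--     if not normalized:
--         return "warning"
--     for flag in ("error", "stale", "warning"):
--         if flag in normalized:
--             return flag
--     return "ok"
--
-- def _normalize_quality_flag(value: str) -> str:
--     if value in {"ok", "warning", "error", "stale"}:
--         return value
--     return "warning"
-- ===== SOURCE B (Python) =====
-- _PRIORITY = {"error": 0, "stale": 1, "warning": 2, "ok": 3}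
-- _ORDER = ("error", "stale", "warning", "ok")
--
--
-- def _aggregate_quality_flags(values: list[str]) -> str:
--     best = None
--     for value in values:
--         if not value:
--             continue
--         i = _PRIORITY.get(value, 2)  # unknown flags normalize to "warning"
--         if best is None or i < best:
--             best = i
--     if best is None:
--         return "warning"
--     return _ORDER[best]
-- ===== Notes on version B (the rewrite author's own statement) =====
-- stated objective: simpler
-- what changed: Replaces the build-a-normalized-set-then-scan-the-priority-tuple structure by a single pass that keeps the running minimum priority index (via one dict lookup with default), indexing a priority tuple at the end.
import Mathlib
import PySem

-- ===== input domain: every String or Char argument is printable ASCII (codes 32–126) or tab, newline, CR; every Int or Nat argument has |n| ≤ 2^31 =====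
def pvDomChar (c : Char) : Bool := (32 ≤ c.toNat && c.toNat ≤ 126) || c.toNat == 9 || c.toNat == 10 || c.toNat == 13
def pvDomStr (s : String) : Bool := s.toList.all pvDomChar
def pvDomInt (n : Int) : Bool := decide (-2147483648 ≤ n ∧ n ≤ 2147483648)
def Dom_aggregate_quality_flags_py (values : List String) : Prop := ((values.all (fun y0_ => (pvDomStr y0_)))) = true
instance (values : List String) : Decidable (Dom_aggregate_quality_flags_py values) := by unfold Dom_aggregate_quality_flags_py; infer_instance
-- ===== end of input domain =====

-- B replaces A's set-then-priority-scan by one pass keeping the running minimum priority index (simpler decomposition).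


-- ===== PORT A =====
def normalize_quality_flag_py (value : String) : String :=
  if value ∈ (PySem.Set.ofList ["ok", "warning", "error", "stale"]) then value else "warning"

def aggregate_quality_flags_py (values : List String) : String :=
  -- normalized = {_normalize_quality_flag(value) for value in values if value}
  let normalized : PySem.Set String :=
    values.foldl (fun s v => if v ≠ "" then PySem.Set.add s (normalize_quality_flag_py v) else s)
      PySem.Set.empty
  if normalized = [] then "warning"
  else  -- for flag in ("error", "stale", "warning"): if flag in normalized: return flag
    if PySem.Set.contains normalized "error" then "error"
    else if PySem.Set.contains normalized "stale" then "stale"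
    else if PySem.Set.contains normalized "warning" then "warning"
    else "ok"

-- ===== PORT B =====
def altPriority : PySem.Dict String Int :=
  PySem.Dict.ofList [("error", 0), ("stale", 1), ("warning", 2), ("ok", 3)]

def altOrder : List String := ["error", "stale", "warning", "ok"]

-- step of 'if best is None or i < best: best = i'
def altStep (best : Option Int) (i : Int) : Option Int :=
  match best with
  | none => some i
  | some b => if i < b then some i else some b

def aggregate_quality_flags_py_alt (values : List String) : String :=
  let best : Option Int :=
    values.foldl
      (fun best value =>
        if value = "" then best
        else altStep best (PySem.Dict.getD altPriority value 2))
      none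
  match best with
  | none => "warning"
  | some b => PySem.List.pyGetD altOrder b ""

-- ===== PRECONDITION & SPEC =====
def Spec_aggregate_quality_flags_py (values : List String) (out : String) : Prop := out = aggregate_quality_flags_py_alt values
instance (values : List String) (out : String) : Decidable (Spec_aggregate_quality_flags_py values out) := by unfold Spec_aggregate_quality_flags_py; infer_instance

-- ===== CLAIM (what is proved, stated in full; the proofs are below) =====
def Claim_equal_aggregate_quality_flags_py : Prop := ∀ (values : List String), Dom_aggregate_quality_flags_py values → Spec_aggregate_quality_flags_py values (aggregate_quality_flags_py values)

-- ===== LEMMAS AND PROOFS =====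


-- s contains only the four flag strings
def FlagsInv (s : List String) : Prop :=
  ∀ x ∈ s, x = "ok" ∨ x = "warning" ∨ x = "error" ∨ x = "stale"

-- the running-minimum value B's state should hold for A's set state s
def encodeSet (s : List String) : Option Int :=
  if "error" ∈ s then some 0
  else if "stale" ∈ s then some 1
  else if "warning" ∈ s then some 2
  else if "ok" ∈ s then some 3
  else none

def flagIdx (f : String) : Int :=
  if f = "error" then 0 else if f = "stale" then 1 else if f = "warning" then 2 else 3

lemma idx_norm (v : String) :
    PySem.Dict.getD altPriority v 2 = flagIdx (normalize_quality_flag_py v) := by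
  have hd : altPriority = PySem.Dict.mk [("error", 0), ("stale", 1), ("warning", 2), ("ok", 3)] := by
    decide
  by_cases h1 : v = "error"
  · subst h1; decide
  by_cases h2 : v = "stale"
  · subst h2; decide
  by_cases h3 : v = "warning"
  · subst h3; decide
  by_cases h4 : v = "ok"
  · subst h4; decide
  rw [hd]
  simp [PySem.Dict.getD_eq_get?_getD, beq_iff_eq,
    Ne.symm h1, Ne.symm h2, Ne.symm h3, Ne.symm h4, normalize_quality_flag_py,
    PySem.Set.mem_ofList, flagIdx, h1, h2, h3, h4, PySem.Dict.get?]

lemma norm_flag (v : String) :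
    normalize_quality_flag_py v = "ok" ∨ normalize_quality_flag_py v = "warning" ∨
    normalize_quality_flag_py v = "error" ∨ normalize_quality_flag_py v = "stale" := by
  unfold normalize_quality_flag_py
  split <;> simp_all [PySem.Set.mem_ofList]

lemma encode_add (s : List String) (f : String)
    (hf : f = "ok" ∨ f = "warning" ∨ f = "error" ∨ f = "stale") :
    encodeSet (PySem.Set.add s f) = altStep (encodeSet s) (flagIdx f) := by
  by_cases h1 : "error" ∈ s <;> by_cases h2 : "stale" ∈ s <;>
    by_cases h3 : "warning" ∈ s <;> by_cases h4 : "ok" ∈ s <;>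
    rcases hf with rfl | rfl | rfl | rfl <;>
    simp [encodeSet, h1, h2, h3, h4, altStep, flagIdx]

lemma loop_eq (values : List String) (s : List String) (b : Option Int)
    (hs : FlagsInv s) (hb : b = encodeSet s) :
    FlagsInv (values.foldl
      (fun s v => if v ≠ "" then PySem.Set.add s (normalize_quality_flag_py v) else s) s) ∧
    values.foldl
      (fun best value =>
        if value = "" then best
        else altStep best (PySem.Dict.getD altPriority value 2)) b
      = encodeSet (values.foldl
      (fun s v => if v ≠ "" then PySem.Set.add s (normalize_quality_flag_py v) else s) s) := by
  induction values generalizing s b with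
  | nil => exact ⟨hs, hb⟩
  | cons v vs ih =>
    by_cases hv : v = ""
    · simpa [hv] using ih s b hs hb
    · have hs' : FlagsInv (PySem.Set.add s (normalize_quality_flag_py v)) := by
        intro x hx
        rcases (PySem.Set.mem_add _ _ _).1 hx with h | h
        · exact hs x h
        · subst h; exact norm_flag v
      have hb' : altStep b (PySem.Dict.getD altPriority v 2)
          = encodeSet (PySem.Set.add s (normalize_quality_flag_py v)) := by
        rw [hb, idx_norm, encode_add s _ (norm_flag v)]
      simpa [hv] using ih _ _ hs' hb'

lemma encodeSet_empty : encodeSet ([] : List String) = none := by simp [encodeSet]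

-- ===== VERDICT (by name: the statement is the Claim_ definition above) =====
theorem aggregate_quality_flags_py_spec : Claim_equal_aggregate_quality_flags_py := by
  intro values _
  unfold Spec_aggregate_quality_flags_py aggregate_quality_flags_py aggregate_quality_flags_py_alt
  obtain ⟨hinv, hb⟩ := loop_eq values [] none (by intro x hx; simp at hx) encodeSet_empty.symm
  set s' := values.foldl
      (fun s v => if v ≠ "" then PySem.Set.add s (normalize_quality_flag_py v) else s) [] with hs'
  rw [show (PySem.Set.empty : PySem.Set String) = ([] : List String) from rfl, ← hs'] at *
  rw [hb]
  by_cases hnil : s' = []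
  · simp [hnil, encodeSet]
  · by_cases h1 : "error" ∈ s'
    · simp [hnil, encodeSet, h1, altOrder, PySem.List.pyGetD,
        PySem.List.pyGet?, PySem.List.pyIdx?]
    · by_cases h2 : "stale" ∈ s'
      · simp [hnil, encodeSet, h1, h2, altOrder, PySem.List.pyGetD,
          PySem.List.pyGet?, PySem.List.pyIdx?]
      · by_cases h3 : "warning" ∈ s'
        · simp [hnil, encodeSet, h1, h2, h3, altOrder, PySem.List.pyGetD,
            PySem.List.pyGet?, PySem.List.pyIdx?]
        · have h4 : "ok" ∈ s' := by
            obtain ⟨x, hx⟩ := List.exists_mem_of_ne_nil s' hnil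
            rcases hinv x hx with rfl | rfl | rfl | rfl <;> first | exact hx | exact absurd hx (by assumption)
          simp [hnil, encodeSet, h1, h2, h3, h4, altOrder,
            PySem.List.pyGetD, PySem.List.pyGet?, PySem.List.pyIdx?]
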